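-- pv_equiv track=rewrite | github.com/Arsen1302/Code-copy-detector | TestData/solutions/problem_1685_1.py | solution_1685_1
-- ===== SOURCE A (Python) =====
-- def solution_1685_1(s: str) -> int:
--     n = len(s)
--     if len(set(s)) == 1:
--         return n
--     dp = [1] * n
--     for i in range(n - 2, -1, -1):
--         for l in range(1, (n - i) // 2 + 1):
--             if s[i : i + l] == s[i + l : i + 2 * l]:
--                 dp[i] = max(dp[i], 1 + dp[i + l])
--     return dp[0]
-- ===== SOURCE B (Python) =====
-- def solution_1685_1(s: str) -> int:
--     # O(n^2): rolling LCP row gives O(1) block-equality tests inside the dp,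
--     # replacing A's O(n) substring comparisons (and A's redundant all-equal fast path).
--     n = len(s)
--     prev = [0] * (n + 1)        # prev[j] = lcp(s[i+1:], s[j:])
--     dp = [0] * (n + 1)          # dp[i] = longest block chain starting at i
--     for i in range(n - 1, -1, -1):
--         cur = [0] * (n + 1)     # cur[j] = lcp(s[i:], s[j:]) for j > i
--         for j in range(i + 1, n):
--             if s[i] == s[j]:
--                 cur[j] = prev[j + 1] + 1
--         best = 1
--         for l in range(1, (n - i) // 2 + 1):
--             if cur[i + l] >= l:                 # s[i:i+l] == s[i+l:i+2l]
--                 best = max(best, 1 + dp[i + l])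
--         dp[i] = best
--         prev = cur
--     return dp[0]
-- ===== Notes on version B (the rewrite author's own statement) =====
-- stated objective: faster
-- what changed: Replaces A's O(n) substring comparison inside the dp by an O(1) lookup in a rolling longest-common-prefix row (lcp(i,j) = lcp(i+1,j+1)+1 when s[i]==s[j]), and drops A's redundant all-equal fast path (the dp already returns n there); A raises IndexError on the empty string, B returns 0.
import Mathlib
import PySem

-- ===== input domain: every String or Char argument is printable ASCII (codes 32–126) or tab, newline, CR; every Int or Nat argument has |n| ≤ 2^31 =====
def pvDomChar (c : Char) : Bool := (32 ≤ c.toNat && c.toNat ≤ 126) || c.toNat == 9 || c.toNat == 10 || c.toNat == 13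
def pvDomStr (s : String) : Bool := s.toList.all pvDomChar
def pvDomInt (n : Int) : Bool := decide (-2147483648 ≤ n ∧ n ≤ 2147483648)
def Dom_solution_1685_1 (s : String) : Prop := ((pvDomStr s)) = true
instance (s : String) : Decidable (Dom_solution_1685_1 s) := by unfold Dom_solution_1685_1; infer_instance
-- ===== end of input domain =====

-- B replaces A's O(n)-per-test substring comparison by an O(1) rolling LCP-row lookup
-- (and omits A's redundant all-equal fast path); equivalence is proved on nonempty strings.

-- ===== PORT A =====
def solution_1685_1 (s : String) : Int :=
  let cs := s.toList
  let n : Int := PySem.List.len cs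
  if PySem.List.len (PySem.Set.ofList cs) = 1 then n
  else
    let dp : List Int := PySem.List.pyRepeat [(1 : Int)] n
    let dp := (PySem.List.pyRange (n - 2) (-1) (-1)).foldl (fun dp i =>
      (PySem.List.pyRange 1 (PySem.Int.floordiv (n - i) 2 + 1) 1).foldl (fun dp l =>
        if PySem.List.slice cs (some i) (some (i + l)) =
           PySem.List.slice cs (some (i + l)) (some (i + 2 * l)) then
          -- dp[i] = max(dp[i], 1 + dp[i + l]); all indices provably in range
          PySem.List.pySetD dp i (max (PySem.List.pyGetD dp i 0) (1 + PySem.List.pyGetD dp (i + l) 0))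
        else dp) dp) dp
    PySem.List.pyGetD dp 0 0   -- dp[0]; in range since Pre_ gives n ≥ 1

-- ===== PORT B =====
def solution_1685_1_alt (s : String) : Int :=
  let cs := s.toList
  let n : Int := PySem.List.len cs
  let prev : List Int := PySem.List.pyRepeat [(0 : Int)] (n + 1)
  let dp : List Int := PySem.List.pyRepeat [(0 : Int)] (n + 1)
  let st := (PySem.List.pyRange (n - 1) (-1) (-1)).foldl
    (fun (st : List Int × List Int) i =>
      let cur : List Int := PySem.List.pyRepeat [(0 : Int)] (n + 1)
      let cur := (PySem.List.pyRange (i + 1) n 1).foldl (fun cur j =>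
        if PySem.List.pyGetD cs i ' ' = PySem.List.pyGetD cs j ' ' then
          PySem.List.pySetD cur j (PySem.List.pyGetD st.1 (j + 1) 0 + 1)
        else cur) cur
      let best := (PySem.List.pyRange 1 (PySem.Int.floordiv (n - i) 2 + 1) 1).foldl
        (fun best l =>
          if PySem.List.pyGetD cur (i + l) 0 ≥ l then
            max best (1 + PySem.List.pyGetD st.2 (i + l) 0)
          else best) (1 : Int)
      (cur, PySem.List.pySetD st.2 i best)) (prev, dp)
  PySem.List.pyGetD st.2 0 0

-- ===== PRECONDITION & SPEC =====
-- Pre_ excludes only the empty string, on which A raises IndexError (dp[0] of the empty list).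
def Pre_solution_1685_1 (s : String) : Prop := ¬ (s = "")
instance (s : String) : Decidable (Pre_solution_1685_1 s) := by unfold Pre_solution_1685_1; infer_instance
def pvWitness_solution_1685_1 : String := "ababab!"

def Spec_solution_1685_1 (s : String) (out : Int) : Prop := out = solution_1685_1_alt s
instance (s : String) (out : Int) : Decidable (Spec_solution_1685_1 s out) := by unfold Spec_solution_1685_1; infer_instance

-- ===== CLAIM (what is proved, stated in full; the proofs are below) =====
def Claim_equal_solution_1685_1 : Prop := ∀ (s : String), Dom_solution_1685_1 s → Pre_solution_1685_1 s → Spec_solution_1685_1 s (solution_1685_1 s)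

-- ===== LEMMAS AND PROOFS =====

def lcpL : List Char → List Char → Nat
  | a :: as, b :: bs => if a = b then lcpL as bs + 1 else 0
  | _, _ => 0

theorem lcp_take_iff (l : Nat) (xs ys : List Char) (h : l ≤ ys.length) :
    xs.take l = ys.take l ↔ l ≤ lcpL xs ys := by
  induction l generalizing xs ys with
  | zero => simp
  | succ l ih =>
    cases ys with
    | nil => simp at h
    | cons b bs =>
      cases xs with
      | nil => simp [lcpL]
      | cons a as =>
        by_cases hab : a = b
        · subst hab
          simp only [List.take_succ_cons, List.cons.injEq, true_and, lcpL, if_true]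
          rw [ih as bs (by simpa using h)]
          simp
        · simp [lcpL, hab]

-- generic bounds for a conditional running max

def F (t : List Char) : Int :=
  (List.range (t.length / 2)).attach.foldl
    (fun best kh =>
      if t.take (kh.1 + 1) = (t.drop (kh.1 + 1)).take (kh.1 + 1) then
        max best (1 + F (t.drop (kh.1 + 1)))
      else best) 1
termination_by t.length
decreasing_by
  have hk := kh.2
  simp only [List.mem_range] at hk
  simp only [List.length_drop]
  omega

theorem F_eq (t : List Char) :
    F t = (List.range (t.length / 2)).foldl
      (fun best k =>
        if t.take (k + 1) = (t.drop (k + 1)).take (k + 1) then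
          max best (1 + F (t.drop (k + 1)))
        else best) 1 := by
  rw [F]
  exact List.foldl_attach (l := List.range (t.length / 2))
    (f := fun best k =>
      if t.take (k + 1) = (t.drop (k + 1)).take (k + 1) then
        max best (1 + F (t.drop (k + 1)))
      else best)

theorem foldmax_le' {α : Type} (g : α → Int) (M : Int) :
    ∀ (L : List α) (b : Int), b ≤ M → (∀ x ∈ L, g x ≤ M) →
      L.foldl (fun best x => max best (g x)) b ≤ M := by
  intro L
  induction L with
  | nil => intro b hb _; simpa using hb
  | cons y L ih =>
    intro b hb hg
    exact ih _ (max_le hb (hg y List.mem_cons_self)) (fun x hx => hg x (List.mem_cons_of_mem _ hx))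

theorem F_singleton (t : List Char) (h : t.length = 1) : F t = 1 := by
  rw [F_eq, h]
  simp

theorem F_allsame (a : Char) : ∀ (m : ℕ) (t : List Char), t.length = m → t ≠ [] →
    (∀ c ∈ t, c = a) → F t = (t.length : Int) := by
  intro m
  induction m using Nat.strong_induction_on with
  | _ m ih =>
    intro t hlen hne hall
    have hrep : t = List.replicate t.length a := List.eq_replicate_of_mem hall
    have hm1 : 1 ≤ m := by
      cases t with
      | nil => exact absurd rfl hne
      | cons x xs => simp at hlen; omega
    rw [F_eq]
    -- every candidate k gives value  t.length - k ; condition always true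
    have hbody : ∀ (b : Int), ∀ k ∈ List.range (t.length / 2),
        (if t.take (k + 1) = (t.drop (k + 1)).take (k + 1) then
          max b (1 + F (t.drop (k + 1)))
        else b) = max b ((t.length : Int) - k) := by
      intro b k hk
      simp only [List.mem_range] at hk
      have hcond : t.take (k + 1) = (t.drop (k + 1)).take (k + 1) := by
        conv_lhs => rw [hrep]
        conv_rhs => rw [hrep]
        rw [List.take_replicate, List.drop_replicate, List.take_replicate]
        congr 1
        omega
      have hdroplen : (t.drop (k + 1)).length = t.length - (k + 1) := by
        simp
      have hFdrop : F (t.drop (k + 1)) = ((t.length - (k + 1) : ℕ) : Int) := by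
        rw [← hdroplen]
        refine ih (t.length - (k+1)) (by omega) _ (by simp) ?_ ?_
        · intro hnil
          have := congrArg List.length hnil
          simp at this
          omega
        · intro c hc
          exact hall c (List.mem_of_mem_drop hc)
      rw [if_pos hcond, hFdrop]
      congr 1
      omega
    rw [List.foldl_ext _ _ 1 hbody]
    by_cases h2 : 2 ≤ m
    · refine le_antisymm (foldmax_le' (fun k : ℕ => (t.length : Int) - k) (t.length : Int)
        (List.range (t.length / 2)) 1 (by omega) (fun x _ => by simp)) ?_
      have hmax := (PySem.List.le_foldl_max_int (List.range (t.length / 2))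
        (fun k : ℕ => (t.length : Int) - k) 1).2 0 (by simp [List.mem_range]; omega)
      simpa using hmax
    · have : m = 1 := by omega
      rw [hlen, this]
      simp


-- fold that only ever writes index p commutes into a single write

theorem A_inner_comm (c : ℕ → Prop) [DecidablePred c] :
    ∀ (L : List ℕ) (dp : List Int) (p : ℕ), p < dp.length →
    L.foldl (fun dp k => if c k then
        PySem.List.pySetD dp (p : Int) (max (PySem.List.pyGetD dp (p : Int) 0)
          (1 + PySem.List.pyGetD dp ((p : Int) + (1 + (k : Int))) 0))
      else dp) dp
    = PySem.List.pySetD dp (p : Int)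
        (L.foldl (fun best k => if c k then
            max best (1 + PySem.List.pyGetD dp ((p : Int) + (1 + (k : Int))) 0)
          else best) (PySem.List.pyGetD dp (p : Int) 0)) := by
  intro L
  induction L with
  | nil =>
    intro dp p hp
    simp only [List.foldl_nil]
    rw [PySem.List.pySetD_natCast, PySem.List.pyGetD_natCast,
      List.getD_eq_getElem dp 0 hp, List.set_getElem_self]
  | cons k L ih =>
    intro dp p hp
    simp only [List.foldl_cons]
    by_cases hc : c k
    · rw [if_pos hc, if_pos hc]
      set v := max (PySem.List.pyGetD dp (p : Int) 0)
          (1 + PySem.List.pyGetD dp ((p : Int) + (1 + (k : Int))) 0) with hv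
      have hlen : p < (PySem.List.pySetD dp (p : Int) v).length := by
        rw [PySem.List.pySetD_natCast]; simpa using hp
      rw [ih (PySem.List.pySetD dp (p : Int) v) p hlen]
      -- reads at p + 1 + k ≠ p are unchanged; collapse the two writes
      have hreads : ∀ (b : Int) (k' : ℕ),
          (if c k' then max b (1 + PySem.List.pyGetD (PySem.List.pySetD dp (p : Int) v) ((p : Int) + (1 + (k' : Int))) 0) else b)
          = (if c k' then max b (1 + PySem.List.pyGetD dp ((p : Int) + (1 + (k' : Int))) 0) else b) := by
        intro b k'
        by_cases hck : c k'
        · rw [if_pos hck, if_pos hck,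
            show ((p : Int) + (1 + (k' : Int))) = ((p + (1 + k') : ℕ) : Int) by push_cast; ring,
            PySem.List.pyGetD_pySetD_natCast dp p (p + (1 + k')) v 0 hp, if_neg (by omega)]
        · rw [if_neg hck, if_neg hck]
      have hget : PySem.List.pyGetD (PySem.List.pySetD dp (p : Int) v) (p : Int) 0 = v := by
        rw [PySem.List.pyGetD_pySetD_natCast dp p p v 0 hp, if_pos rfl]
      rw [List.foldl_ext _ _ _ (fun b k' _ => hreads b k'), hget]
      rw [PySem.List.pySetD_natCast, PySem.List.pySetD_natCast, PySem.List.pySetD_natCast,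
        List.set_set]
    · rw [if_neg hc, if_neg hc]
      exact ih dp p hp

theorem A_step (cs : List Char) (p : ℕ) (hp : p < cs.length)
    (dp : List Int) (hlen : dp.length = cs.length)
    (hdpp : PySem.List.pyGetD dp (p : Int) 0 = 1)
    (hdp : ∀ j : ℕ, p < j → j < cs.length → PySem.List.pyGetD dp (j : Int) 0 = F (cs.drop j)) :
    (PySem.List.pyRange 1 (PySem.Int.floordiv ((cs.length : Int) - (p : Int)) 2 + 1) 1).foldl
      (fun dp l =>
        if PySem.List.slice cs (some (p : Int)) (some ((p : Int) + l)) =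
           PySem.List.slice cs (some ((p : Int) + l)) (some ((p : Int) + 2 * l)) then
          PySem.List.pySetD dp (p : Int) (max (PySem.List.pyGetD dp (p : Int) 0)
            (1 + PySem.List.pyGetD dp ((p : Int) + l) 0))
        else dp) dp
    = dp.set p (F (cs.drop p)) := by
  have hfd : PySem.Int.floordiv ((cs.length : Int) - (p : Int)) 2 = (((cs.length - p) / 2 : ℕ) : Int) := by
    rw [show ((cs.length : Int) - (p : Int)) = (((cs.length - p : ℕ)) : Int) by omega]
    exact_mod_cast PySem.Int.floordiv_natCast (cs.length - p) 2
  set M : ℕ := (cs.length - p) / 2 with hM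
  rw [hfd, PySem.List.pyRange_one]
  rw [show (((M : Int) + 1 - 1).toNat) = M by omega]
  rw [List.foldl_map]
  -- now a fold over List.range M with l = 1 + k
  rw [A_inner_comm (fun k : ℕ =>
      PySem.List.slice cs (some (p : Int)) (some ((p : Int) + (1 + (k : Int)))) =
      PySem.List.slice cs (some ((p : Int) + (1 + (k : Int)))) (some ((p : Int) + 2 * (1 + (k : Int)))))
    (List.range M) dp p (by omega)]
  rw [hdpp, PySem.List.pySetD_natCast]
  congr 1
  rw [F_eq]
  have hlen2 : (cs.drop p).length / 2 = M := by simp [hM]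
  rw [hlen2]
  refine List.foldl_ext _ _ 1 ?_
  intro b k hk
  simp only [List.mem_range] at hk
  -- condition equivalence and value equality
  have hkcast : ((p : Int) + (1 + (k : Int))) = (((p + (k + 1)) : ℕ) : Int) := by push_cast; ring
  have hcond : (PySem.List.slice cs (some (p : Int)) (some ((p : Int) + (1 + (k : Int)))) =
         PySem.List.slice cs (some ((p : Int) + (1 + (k : Int)))) (some ((p : Int) + 2 * (1 + (k : Int)))))
      ↔ ((cs.drop p).take (k + 1) = ((cs.drop p).drop (k + 1)).take (k + 1)) := by
    rw [hkcast,
      show ((p : Int) + 2 * (1 + (k : Int))) = (((p + (k + 1) + (k + 1)) : ℕ) : Int) by push_cast; ring,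
      show ((p : Int)) = ((p : ℕ) : Int) from rfl]
    rw [PySem.List.slice_natCast, PySem.List.slice_natCast]
    rw [List.drop_drop]
    constructor
    · intro h
      convert h using 2 <;> omega
    · intro h
      convert h using 2 <;> omega
  have hval : PySem.List.pyGetD dp ((p : Int) + (1 + (k : Int))) 0 = F (cs.drop (p + (k + 1))) := by
    rw [hkcast]
    exact hdp (p + (k + 1)) (by omega) (by omega)
  rw [hval]
  by_cases hc : (cs.drop p).take (k + 1) = ((cs.drop p).drop (k + 1)).take (k + 1)
  · rw [if_pos (hcond.mpr hc), if_pos hc, List.drop_drop]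
  · rw [if_neg (fun hh => hc (hcond.mp hh)), if_neg hc]

theorem A_loop (cs : List Char) :
    ∀ (i : ℕ), i + 1 ≤ cs.length →
    ∀ dp : List Int, dp.length = cs.length →
    (∀ j : ℕ, j < cs.length → dp.getD j 0 = if i ≤ j then F (cs.drop j) else 1) →
    ((PySem.List.pyRange ((i : Int) - 1) (-1) (-1)).foldl
        (fun dp i =>
          (PySem.List.pyRange 1 (PySem.Int.floordiv ((cs.length : Int) - i) 2 + 1) 1).foldl
            (fun dp l => if PySem.List.slice cs (some i) (some (i + l)) =
                PySem.List.slice cs (some (i + l)) (some (i + 2 * l)) then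
              PySem.List.pySetD dp i (max (PySem.List.pyGetD dp i 0)
                (1 + PySem.List.pyGetD dp (i + l) 0))
            else dp) dp) dp).length = cs.length ∧
    ∀ j : ℕ, j < cs.length →
      ((PySem.List.pyRange ((i : Int) - 1) (-1) (-1)).foldl
        (fun dp i =>
          (PySem.List.pyRange 1 (PySem.Int.floordiv ((cs.length : Int) - i) 2 + 1) 1).foldl
            (fun dp l => if PySem.List.slice cs (some i) (some (i + l)) =
                PySem.List.slice cs (some (i + l)) (some (i + 2 * l)) then
              PySem.List.pySetD dp i (max (PySem.List.pyGetD dp i 0)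
                (1 + PySem.List.pyGetD dp (i + l) 0))
            else dp) dp) dp).getD j 0 = F (cs.drop j) := by
  intro i
  induction i with
  | zero =>
    intro _ dp hlen hinv
    rw [PySem.List.pyRange_neg_one_eq_nil (by omega)]
    refine ⟨hlen, fun j hj => ?_⟩
    simpa using hinv j hj
  | succ i ih =>
    intro hi dp hlen hinv
    rw [show (((i + 1 : ℕ) : Int) - 1) = (i : Int) by push_cast; ring]
    rw [PySem.List.pyRange_neg_one_cons (by omega), List.foldl_cons]
    have hstep : (PySem.List.pyRange 1 (PySem.Int.floordiv ((cs.length : Int) - (i : Int)) 2 + 1) 1).foldl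
        (fun dp l => if PySem.List.slice cs (some (i : Int)) (some ((i : Int) + l)) =
            PySem.List.slice cs (some ((i : Int) + l)) (some ((i : Int) + 2 * l)) then
          PySem.List.pySetD dp (i : Int) (max (PySem.List.pyGetD dp (i : Int) 0)
            (1 + PySem.List.pyGetD dp ((i : Int) + l) 0))
        else dp) dp = dp.set i (F (cs.drop i)) := by
      refine A_step cs i (by omega) dp hlen ?_ ?_
      · rw [PySem.List.pyGetD_natCast]
        simpa using hinv i (by omega)
      · intro j hji hj
        rw [PySem.List.pyGetD_natCast]
        simpa [show i + 1 ≤ j from hji] using hinv j hj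
    rw [hstep]
    refine ih (by omega) _ (by simpa using hlen) ?_
    intro j hj
    have hset : (dp.set i (F (cs.drop i))).getD j 0
        = if j = i then F (cs.drop i) else dp.getD j 0 := by
      rcases eq_or_ne j i with rfl | hne
      · simp [List.getD_eq_getElem?_getD, hlen, hj]
      · simp [List.getD_eq_getElem?_getD, List.getElem?_set_ne hne.symm, hne]
    rw [hset]
    rcases eq_or_ne j i with rfl | hne
    · simp
    · rw [if_neg hne, hinv j hj]
      rcases Nat.lt_or_ge j i with h | h
      · rw [if_neg (by omega), if_neg (by omega)]
      · rw [if_pos (by omega), if_pos (by omega)]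

theorem allsame_of_set_len_one (cs : List Char) (h : (PySem.Set.ofList cs).length = 1) :
    ∃ a, ∀ c ∈ cs, c = a := by
  cases hS : PySem.Set.ofList cs with
  | nil => rw [hS] at h; simp at h
  | cons a rest =>
    refine ⟨a, fun c hc => ?_⟩
    have hm : c ∈ PySem.Set.ofList cs := by
      rw [PySem.Set.mem_ofList]; exact hc
    rw [hS] at h hm
    have : rest = [] := by simpa using h
    subst this
    simpa using hm

theorem main_A (s : String) (h : s.toList ≠ []) :
    solution_1685_1 s = F s.toList := by
  have hn : 1 ≤ s.toList.length := by
    cases hcs : s.toList with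
    | nil => exact absurd hcs h
    | cons a t => simp
  simp only [solution_1685_1, PySem.List.len_eq]
  split_ifs with h1
  · obtain ⟨a, ha⟩ := allsame_of_set_len_one s.toList (by exact_mod_cast h1)
    rw [F_allsame a s.toList.length s.toList rfl h ha]
  · rw [show PySem.List.pyRepeat [(1 : Int)] (s.toList.length : Int)
        = List.replicate s.toList.length 1 by
      rw [PySem.List.pyRepeat_singleton]; simp]
    rw [show ((s.toList.length : Int) - 2) = (((s.toList.length - 1 : ℕ) : Int) - 1) by omega]
    have hmain := A_loop s.toList (s.toList.length - 1) (by omega)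
      (List.replicate s.toList.length 1) (by simp) ?_
    · rw [PySem.List.pyGetD_zero]
      simpa using hmain.2 0 (by omega)
    · intro j hj
      rw [List.getD_eq_getElem _ _ (by simpa using hj), List.getElem_replicate]
      rcases Nat.lt_or_ge j (s.toList.length - 1) with hlt | hge
      · rw [if_neg (by omega)]
      · rw [if_pos (by omega)]
        rw [F_singleton _ (by simp only [List.length_drop]; omega)]

theorem B_cur (cnd : Int → Prop) [DecidablePred cnd] (g : Int → Int) :
    ∀ (d a b : ℕ), b ≤ a + d →
    ∀ cur : List Int, b ≤ cur.length →
    (((PySem.List.pyRange (a : Int) (b : Int) 1).foldl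
        (fun cur j => if cnd j then PySem.List.pySetD cur j (g j) else cur) cur).length
      = cur.length) ∧
    ∀ j : ℕ, j < cur.length →
      ((PySem.List.pyRange (a : Int) (b : Int) 1).foldl
        (fun cur j => if cnd j then PySem.List.pySetD cur j (g j) else cur) cur).getD j 0
      = if a ≤ j ∧ j < b ∧ cnd (j : Int) then g (j : Int) else cur.getD j 0 := by
  intro d
  induction d with
  | zero =>
    intro a b hb cur hlen
    rw [PySem.List.pyRange_one_eq_nil (by exact_mod_cast by omega)]
    refine ⟨rfl, fun j hj => ?_⟩
    rw [if_neg (by omega)]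
    simp
  | succ d ih =>
    intro a b hb cur hlen
    rcases Nat.lt_or_ge a b with hab | hab
    · rw [PySem.List.pyRange_one_cons (by exact_mod_cast hab), List.foldl_cons,
        show ((a : Int) + 1) = ((a + 1 : ℕ) : Int) by push_cast; ring]
      set cur1 := if cnd (a : Int) then PySem.List.pySetD cur (a : Int) (g (a : Int)) else cur with hcur1
      have hlen1 : cur1.length = cur.length := by
        rw [hcur1]; split
        · rw [PySem.List.pySetD_natCast]; simp
        · rfl
      obtain ⟨ihlen, ihget⟩ := ih (a + 1) b (by omega) cur1 (by omega)
      refine ⟨by rw [ihlen, hlen1], fun j hj => ?_⟩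
      rw [ihget j (by omega)]
      have hc1get : cur1.getD j 0 = if j = a ∧ cnd (a : Int) then g (a : Int) else cur.getD j 0 := by
        rw [hcur1]
        split
        · rw [PySem.List.pySetD_natCast]
          rcases eq_or_ne j a with rfl | hne
          · simp_all [List.getD_eq_getElem?_getD]
          · simp [List.getD_eq_getElem?_getD, List.getElem?_set_ne hne.symm, hne]
        · rw [if_neg (by tauto)]
      rcases eq_or_ne j a with rfl | hne
      · rw [if_neg (by omega), hc1get]
        by_cases hcnd : cnd (j : Int)
        · rw [if_pos ⟨rfl, hcnd⟩, if_pos ⟨le_refl _, hab, hcnd⟩]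
        · rw [if_neg (by tauto), if_neg (by tauto)]
      · by_cases hin : a + 1 ≤ j ∧ j < b ∧ cnd (j : Int)
        · rw [if_pos hin, if_pos ⟨by omega, hin.2⟩]
        · rw [if_neg hin, hc1get, if_neg (by tauto), if_neg (by
            intro ⟨h1, h2, h3⟩
            exact hin ⟨by omega, h2, h3⟩)]
    · rw [PySem.List.pyRange_one_eq_nil (by exact_mod_cast by omega)]
      refine ⟨rfl, fun j hj => ?_⟩
      rw [if_neg (by omega)]
      simp

def stepB (cs : List Char) (st : List Int × List Int) (i : Int) : List Int × List Int :=
  let n : Int := PySem.List.len cs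
  let cur : List Int := PySem.List.pyRepeat [(0 : Int)] (n + 1)
  let cur := (PySem.List.pyRange (i + 1) n 1).foldl (fun cur j =>
    if PySem.List.pyGetD cs i ' ' = PySem.List.pyGetD cs j ' ' then
      PySem.List.pySetD cur j (PySem.List.pyGetD st.1 (j + 1) 0 + 1)
    else cur) cur
  let best := (PySem.List.pyRange 1 (PySem.Int.floordiv (n - i) 2 + 1) 1).foldl
    (fun best l =>
      if PySem.List.pyGetD cur (i + l) 0 ≥ l then
        max best (1 + PySem.List.pyGetD st.2 (i + l) 0)
      else best) (1 : Int)
  (cur, PySem.List.pySetD st.2 i best)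

theorem alt_eq (s : String) :
    solution_1685_1_alt s = PySem.List.pyGetD
      ((PySem.List.pyRange ((PySem.List.len s.toList) - 1) (-1) (-1)).foldl (stepB s.toList)
        (PySem.List.pyRepeat [(0 : Int)] ((PySem.List.len s.toList) + 1),
         PySem.List.pyRepeat [(0 : Int)] ((PySem.List.len s.toList) + 1))).2 0 0 := rfl

theorem lcpL_nil_right (xs : List Char) : lcpL xs [] = 0 := by
  cases xs <;> rfl

theorem B_row (cs : List Char) (p : ℕ) (hp : p < cs.length) (prev : List Int)
    (hprev : ∀ j : ℕ, p + 2 ≤ j → j ≤ cs.length →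
      prev.getD j 0 = (lcpL (cs.drop (p + 1)) (cs.drop j) : Int)) :
    (((PySem.List.pyRange ((p : Int) + 1) ((cs.length : Int)) 1).foldl
        (fun cur j => if PySem.List.pyGetD cs (p : Int) ' ' = PySem.List.pyGetD cs j ' ' then
            PySem.List.pySetD cur j (PySem.List.pyGetD prev (j + 1) 0 + 1)
          else cur)
        (PySem.List.pyRepeat [(0 : Int)] ((cs.length : Int) + 1))).length = cs.length + 1) ∧
    ∀ j : ℕ, p + 1 ≤ j → j ≤ cs.length →
      ((PySem.List.pyRange ((p : Int) + 1) ((cs.length : Int)) 1).foldl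
        (fun cur j => if PySem.List.pyGetD cs (p : Int) ' ' = PySem.List.pyGetD cs j ' ' then
            PySem.List.pySetD cur j (PySem.List.pyGetD prev (j + 1) 0 + 1)
          else cur)
        (PySem.List.pyRepeat [(0 : Int)] ((cs.length : Int) + 1))).getD j 0
      = (lcpL (cs.drop p) (cs.drop j) : Int) := by
  rw [show ((p : Int) + 1) = ((p + 1 : ℕ) : Int) by push_cast; ring]
  rw [show PySem.List.pyRepeat [(0 : Int)] ((cs.length : Int) + 1)
      = List.replicate (cs.length + 1) 0 by
    rw [PySem.List.pyRepeat_singleton]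
    congr 1]
  obtain ⟨hL, hG⟩ := B_cur
    (fun j => PySem.List.pyGetD cs (p : Int) ' ' = PySem.List.pyGetD cs j ' ')
    (fun j => PySem.List.pyGetD prev (j + 1) 0 + 1)
    (cs.length + 1) (p + 1) cs.length (by omega)
    (List.replicate (cs.length + 1) 0) (by simp)
  refine ⟨by rw [hL]; simp, fun j hj1 hj2 => ?_⟩
  rw [hG j (by simp; omega)]
  rcases Nat.lt_or_ge j cs.length with hjlt | hjge
  · have hcs : PySem.List.pyGetD cs (p : Int) ' ' = cs[p] := by
      rw [PySem.List.pyGetD_natCast, List.getD_eq_getElem _ _ hp]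
    have hcsj : PySem.List.pyGetD cs (j : Int) ' ' = cs[j] := by
      rw [PySem.List.pyGetD_natCast, List.getD_eq_getElem _ _ hjlt]
    have hdp : cs.drop p = cs[p] :: cs.drop (p + 1) := List.drop_eq_getElem_cons hp
    have hdj : cs.drop j = cs[j] :: cs.drop (j + 1) := List.drop_eq_getElem_cons hjlt
    by_cases hc : cs[p] = cs[j]
    · rw [if_pos ⟨hj1, hjlt, by rw [hcs, hcsj, hc]⟩]
      rw [show ((j : Int) + 1) = ((j + 1 : ℕ) : Int) by push_cast; ring,
        PySem.List.pyGetD_natCast, hprev (j + 1) (by omega) (by omega)]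
      rw [hdp, hdj]
      simp only [lcpL, if_pos hc]
      push_cast
      ring
    · rw [if_neg (by
        intro ⟨_, _, hcc⟩
        rw [hcs, hcsj] at hcc
        exact hc hcc)]
      rw [hdp, hdj]
      simp only [lcpL, if_neg hc]
      simp
  · have hj : j = cs.length := by omega
    rw [if_neg (by omega), hj]
    simp [List.drop_length, lcpL_nil_right]

theorem B_step (cs : List Char) (p : ℕ) (hp : p < cs.length) (prev dp : List Int)
    (hdplen : dp.length = cs.length + 1)
    (hprev : ∀ j : ℕ, p + 2 ≤ j → j ≤ cs.length →
      prev.getD j 0 = (lcpL (cs.drop (p + 1)) (cs.drop j) : Int))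
    (hdp : ∀ j : ℕ, p + 1 ≤ j → j < cs.length → dp.getD j 0 = F (cs.drop j)) :
    ∃ cur : List Int,
      stepB cs (prev, dp) (p : Int) = (cur, dp.set p (F (cs.drop p))) ∧
      ∀ j : ℕ, p + 1 ≤ j → j ≤ cs.length →
        cur.getD j 0 = (lcpL (cs.drop p) (cs.drop j) : Int) := by
  obtain ⟨hcurlen, hcur⟩ := B_row cs p hp prev hprev
  simp only [stepB, PySem.List.len_eq]
  refine ⟨_, ?_, hcur⟩
  congr 1
  -- best = F (cs.drop p), then pySetD = set
  have hfd : PySem.Int.floordiv ((cs.length : Int) - (p : Int)) 2 = (((cs.length - p) / 2 : ℕ) : Int) := by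
    rw [show ((cs.length : Int) - (p : Int)) = (((cs.length - p : ℕ)) : Int) by omega]
    exact_mod_cast PySem.Int.floordiv_natCast (cs.length - p) 2
  set M : ℕ := (cs.length - p) / 2 with hM
  set cur := (PySem.List.pyRange ((p : Int) + 1) ((cs.length : Int)) 1).foldl
    (fun cur j => if PySem.List.pyGetD cs (p : Int) ' ' = PySem.List.pyGetD cs j ' ' then
        PySem.List.pySetD cur j (PySem.List.pyGetD prev (j + 1) 0 + 1)
      else cur)
    (PySem.List.pyRepeat [(0 : Int)] ((cs.length : Int) + 1)) with hcurdef
  have hbest : (PySem.List.pyRange 1 (PySem.Int.floordiv ((cs.length : Int) - (p : Int)) 2 + 1) 1).foldl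
      (fun best l => if PySem.List.pyGetD cur ((p : Int) + l) 0 ≥ l then
          max best (1 + PySem.List.pyGetD dp ((p : Int) + l) 0)
        else best) (1 : Int) = F (cs.drop p) := by
    rw [hfd, PySem.List.pyRange_one, show (((M : Int) + 1 - 1).toNat) = M by omega,
      List.foldl_map]
    rw [F_eq]
    have hlen2 : (cs.drop p).length / 2 = M := by simp [hM]
    rw [hlen2]
    refine List.foldl_ext _ _ 1 ?_
    intro b k hk
    simp only [List.mem_range] at hk
    have hkcast : ((p : Int) + (1 + (k : Int))) = (((p + (k + 1)) : ℕ) : Int) := by push_cast; ring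
    have hcurval : PySem.List.pyGetD cur ((p : Int) + (1 + (k : Int))) 0
        = (lcpL (cs.drop p) (cs.drop (p + (k + 1))) : Int) := by
      rw [hkcast, PySem.List.pyGetD_natCast, hcur (p + (k + 1)) (by omega) (by omega)]
    have hcond : (PySem.List.pyGetD cur ((p : Int) + (1 + (k : Int))) 0 ≥ (1 + (k : Int)))
        ↔ ((cs.drop p).take (k + 1) = ((cs.drop p).drop (k + 1)).take (k + 1)) := by
      rw [hcurval, List.drop_drop,
        lcp_take_iff (k + 1) (cs.drop p) (cs.drop (p + (k + 1))) (by simp; omega)]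
      constructor <;> (intro hh; omega)
    have hval : PySem.List.pyGetD dp ((p : Int) + (1 + (k : Int))) 0 = F (cs.drop (p + (k + 1))) := by
      rw [hkcast, PySem.List.pyGetD_natCast, hdp (p + (k + 1)) (by omega) (by omega)]
    by_cases hc : (cs.drop p).take (k + 1) = ((cs.drop p).drop (k + 1)).take (k + 1)
    · rw [if_pos (hcond.mpr hc), if_pos hc, hval, List.drop_drop]
    · rw [if_neg (fun hh => hc (hcond.mp hh)), if_neg hc]
  rw [hbest, PySem.List.pySetD_natCast]

theorem B_loop (cs : List Char) :
    ∀ (i : ℕ), i ≤ cs.length →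
    ∀ (prev dp : List Int), dp.length = cs.length + 1 →
    (∀ j : ℕ, i + 1 ≤ j → j ≤ cs.length →
      prev.getD j 0 = (lcpL (cs.drop i) (cs.drop j) : Int)) →
    (∀ j : ℕ, i ≤ j → j < cs.length → dp.getD j 0 = F (cs.drop j)) →
    ∀ j : ℕ, j < cs.length →
      ((PySem.List.pyRange ((i : Int) - 1) (-1) (-1)).foldl (stepB cs) (prev, dp)).2.getD j 0
        = F (cs.drop j) := by
  intro i
  induction i with
  | zero =>
    intro _ prev dp hdplen hprev hdp j hj
    rw [PySem.List.pyRange_neg_one_eq_nil (by omega)]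
    exact hdp j (by omega) hj
  | succ i ih =>
    intro hi prev dp hdplen hprev hdp j hj
    rw [show (((i + 1 : ℕ) : Int) - 1) = (i : Int) by push_cast; ring,
      PySem.List.pyRange_neg_one_cons (by omega), List.foldl_cons]
    obtain ⟨cur, hstep, hcur⟩ := B_step cs i (by omega) prev dp hdplen
      (fun j h1 h2 => hprev j (by omega) h2) (fun j h1 h2 => hdp j (by omega) h2)
    rw [hstep]
    refine ih (by omega) cur (dp.set i (F (cs.drop i))) (by simpa using hdplen) hcur ?_ j hj
    intro j h1 h2
    rcases eq_or_ne j i with rfl | hne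
    · simp [List.getD_eq_getElem?_getD, hdplen, show j < cs.length + 1 from by omega]
    · simp only [List.getD_eq_getElem?_getD, List.getElem?_set_ne hne.symm]
      rw [← List.getD_eq_getElem?_getD]
      exact hdp j (by omega) h2

theorem main_B (s : String) (h : s.toList ≠ []) :
    solution_1685_1_alt s = F s.toList := by
  have hn : 1 ≤ s.toList.length := by
    cases hcs : s.toList with
    | nil => exact absurd hcs h
    | cons a t => simp
  rw [alt_eq, PySem.List.len_eq]
  have hrep : PySem.List.pyRepeat [(0 : Int)] ((s.toList.length : Int) + 1)
      = List.replicate (s.toList.length + 1) 0 := by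
    rw [PySem.List.pyRepeat_singleton]
    congr 1
  rw [hrep]
  have hmain := B_loop s.toList s.toList.length (le_refl _)
    (List.replicate (s.toList.length + 1) 0) (List.replicate (s.toList.length + 1) 0)
    (by simp) (fun j h1 h2 => by omega) (fun j h1 h2 => by omega) 0 (by omega)
  rw [PySem.List.pyGetD_zero]
  simpa using hmain


-- ===== VERDICT (by name: the statement is the Claim_ definition above) =====
theorem solution_1685_1_spec : Claim_equal_solution_1685_1 := by
  intro s _ hpre
  unfold Spec_solution_1685_1
  have h : s.toList ≠ [] := by
    intro hnil
    exact hpre (String.toList_eq_nil_iff.mp hnil)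
  rw [main_A s h, main_B s h]
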